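-- pv_equiv track=rewrite | github.com/SummerYee/Graduation_Project_new | model.py | get_all_vocabulary
-- ===== SOURCE A (Python) =====
-- def get_all_vocabulary(data, colunm_name):
--     train_vocabulary_list = []
--     max_cut_query_lenth = 0
--
--     for cut_query in data[colunm_name]:
--         if len(cut_query) > max_cut_query_lenth:
--             max_cut_query_lenth = len(cut_query)
--         train_vocabulary_list += cut_query
--     return train_vocabulary_list, max_cut_query_lenth
-- ===== SOURCE B (Python) =====
-- def get_all_vocabulary(data, colunm_name):
--     col = data[colunm_name]
--
--     # Divide and conquer on index ranges: combine by concatenation / max.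
--     def solve(lo, hi):
--         if hi - lo == 0:
--             return [], 0
--         if hi - lo == 1:
--             seq = col[lo]
--             return list(seq), len(seq)
--         mid = (lo + hi) // 2
--         lf, lm = solve(lo, mid)
--         rf, rm = solve(mid, hi)
--         return lf + rf, lm if lm > rm else rm
--
--     return solve(0, len(col))
-- ===== Notes on version B (the rewrite author's own statement) =====
-- stated objective: alternative
-- what changed: Replaces A's single left-to-right fused accumulating loop (running max + repeated list +=) with a divide-and-conquer recursion on index ranges that splits the column in half and combines sub-results by concatenation and max; correct by associativity of ++ and max.
import Mathlib
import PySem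

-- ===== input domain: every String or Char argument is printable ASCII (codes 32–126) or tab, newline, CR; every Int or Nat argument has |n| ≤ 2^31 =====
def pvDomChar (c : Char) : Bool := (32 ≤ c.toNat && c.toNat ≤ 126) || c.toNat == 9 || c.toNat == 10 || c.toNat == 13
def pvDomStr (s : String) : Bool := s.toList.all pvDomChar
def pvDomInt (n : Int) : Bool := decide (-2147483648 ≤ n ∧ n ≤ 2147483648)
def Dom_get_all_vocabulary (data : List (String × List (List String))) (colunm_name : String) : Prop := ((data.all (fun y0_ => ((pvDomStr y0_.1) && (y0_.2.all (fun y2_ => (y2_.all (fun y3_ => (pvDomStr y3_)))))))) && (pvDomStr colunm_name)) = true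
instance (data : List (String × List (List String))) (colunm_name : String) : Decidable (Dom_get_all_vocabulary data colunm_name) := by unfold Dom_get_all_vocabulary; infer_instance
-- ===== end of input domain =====

-- B replaces A's single fused accumulating loop with a divide-and-conquer recursion on
-- index ranges (split in half, combine by ++ / max). Objective: alternative structure.

-- ===== PORT A =====
-- data[colunm_name]: first-match lookup in the association list (KeyError = none).
def pvLookup (data : List (String × List (List String))) (k : String) : Option (List (List String)) :=
  (data.find? (fun p => p.1 == k)).map Prod.snd

-- the fused loop of A: state (train_vocabulary_list, max_cut_query_lenth)
def get_all_vocabulary (data : List (String × List (List String))) (colunm_name : String) : List String × Int :=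
  match pvLookup data colunm_name with
  | none => ([], 0)  -- unreachable under Pre_ (Python raises KeyError)
  | some col =>
    col.foldl
      (fun acc cut_query =>
        let m := if (cut_query.length : Int) > acc.2 then (cut_query.length : Int) else acc.2
        (acc.1 ++ cut_query, m))
      ([], 0)

-- ===== PORT B =====
-- Source B's solve(lo, hi): divide-and-conquer on the index range [lo, hi).
-- Indices are nonnegative throughout, so Nat midpoint (lo+hi)/2 equals Python's (lo+hi)//2.
def pvSolve (col : List (List String)) (lo hi : Nat) : List String × Int :=
  if hi - lo = 0 then ([], 0)
  else if hi - lo = 1 then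
    let seq := (PySem.List.pyGet? col (lo : Int)).getD []  -- col[lo]; in range whenever hi ≤ len col
    (seq, (seq.length : Int))
  else
    let mid := (lo + hi) / 2
    let l := pvSolve col lo mid
    let r := pvSolve col mid hi
    (l.1 ++ r.1, if l.2 > r.2 then l.2 else r.2)
termination_by hi - lo
decreasing_by all_goals omega

def get_all_vocabulary_alt (data : List (String × List (List String))) (colunm_name : String) : List String × Int :=
  match pvLookup data colunm_name with
  | none => ([], 0)  -- unreachable under Pre_ (Python raises KeyError)
  | some col => pvSolve col 0 col.length

-- ===== PRECONDITION & SPEC =====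
-- Pre_ excludes only inputs where Python A raises KeyError (colunm_name absent from data).
def Pre_get_all_vocabulary (data : List (String × List (List String))) (colunm_name : String) : Prop :=
  (pvLookup data colunm_name).isSome = true
instance (data : List (String × List (List String))) (colunm_name : String) : Decidable (Pre_get_all_vocabulary data colunm_name) := by unfold Pre_get_all_vocabulary; infer_instance

def pvWitness_get_all_vocabulary : (List (String × List (List String))) × String :=
  ([("col", [["x", "yy"], [], ["a", "b", "c"]])], "col")

def Spec_get_all_vocabulary (data : List (String × List (List String))) (colunm_name : String) (out : List String × Int) : Prop := out = get_all_vocabulary_alt data colunm_name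
instance (data : List (String × List (List String))) (colunm_name : String) (out : List String × Int) : Decidable (Spec_get_all_vocabulary data colunm_name out) := by unfold Spec_get_all_vocabulary; infer_instance

-- ===== CLAIM (what is proved, stated in full; the proofs are below) =====
def Claim_equal_get_all_vocabulary : Prop := ∀ (data : List (String × List (List String))) (colunm_name : String), Dom_get_all_vocabulary data colunm_name → Pre_get_all_vocabulary data colunm_name → Spec_get_all_vocabulary data colunm_name (get_all_vocabulary data colunm_name)

-- ===== LEMMAS AND PROOFS =====
-- the max-of-lengths of a segment, as a fold from 0
def pvM (s : List (List String)) : Int := s.foldl (fun m x => max m (x.length : Int)) 0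

theorem pvM_shift (s : List (List String)) : ∀ m : Int, 0 ≤ m →
    s.foldl (fun a x => max a (x.length : Int)) m = max m (pvM s) := by
  induction s with
  | nil => intro m hm; simp [pvM]; omega
  | cons x xs ih =>
    intro m hm
    have h1 := ih (max m (x.length : Int)) (by positivity)
    have h2 := ih (max 0 (x.length : Int)) (by positivity)
    simp only [List.foldl_cons, pvM] at *
    rw [h1, h2]
    omega

theorem pvM_append (s t : List (List String)) : pvM (s ++ t) = max (pvM s) (pvM t) := by
  have h : 0 ≤ pvM s := by
    have := pvM_shift s 0 le_rfl
    simp [pvM] at *; omega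
  simp only [pvM, List.foldl_append]
  exact pvM_shift t (pvM s) h

-- Invariant of A's fused loop: it computes the concatenation and the running max separately.
theorem pv_fused_loop (col : List (List String)) (l : List String) (m : Int) (hm : 0 ≤ m) :
    col.foldl
      (fun acc cut_query =>
        let mm := if (cut_query.length : Int) > acc.2 then (cut_query.length : Int) else acc.2
        (acc.1 ++ cut_query, mm))
      (l, m)
    = (l ++ col.flatMap id, max m (pvM col)) := by
  induction col generalizing l m with
  | nil => simp [pvM]; omega
  | cons x xs ih =>
    simp only [List.foldl_cons, List.flatMap_cons, id]
    rw [ih (l ++ x) _ (by positivity)]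
    have hx := pvM_shift xs (max 0 (x.length : Int)) (by positivity)
    simp only [pvM, List.foldl_cons] at *
    rw [hx]
    simp only [Prod.mk.injEq]
    refine ⟨by simp [List.append_assoc], by omega⟩

-- B's divide-and-conquer computes the same two quantities on the segment [lo, hi).
theorem pvSolve_eq (col : List (List String)) : ∀ n lo hi, hi - lo = n → hi ≤ col.length →
    pvSolve col lo hi = (((col.drop lo).take (hi - lo)).flatMap id, pvM ((col.drop lo).take (hi - lo))) := by
  intro n
  induction n using Nat.strong_induction_on with
  | _ n ih =>
    intro lo hi hn hhi
    rw [pvSolve]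
    by_cases h0 : hi - lo = 0
    · simp [h0, pvM]
    · by_cases h1 : hi - lo = 1
      · have hlt : lo < col.length := by omega
        have : (PySem.List.pyGet? col (lo : Int)) = some col[lo] := by
          simp [PySem.List.pyGet?, PySem.List.pyIdx?, hlt]
        have hseg : (col.drop lo).take (hi - lo) = [col[lo]] := by
          rw [h1, List.take_one]
          simp [List.head?_drop, List.getElem?_eq_getElem hlt]
        rw [if_neg h0, if_pos h1, hseg, this]
        simp [pvM]
      · simp only [h0, h1, if_false]
        have hmid1 : lo < (lo + hi) / 2 := by omega
        have hmid2 : (lo + hi) / 2 < hi := by omega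
        rw [ih ((lo + hi) / 2 - lo) (by omega) lo _ rfl (by omega),
            ih (hi - (lo + hi) / 2) (by omega) _ hi rfl hhi]
        have hsplit : (col.drop lo).take (hi - lo)
            = (col.drop lo).take ((lo + hi) / 2 - lo) ++ (col.drop ((lo + hi) / 2)).take (hi - (lo + hi) / 2) := by
          have hdd : (col.drop lo).drop ((lo + hi) / 2 - lo) = col.drop ((lo + hi) / 2) := by
            rw [List.drop_drop]; congr 1; omega
          have hs : hi - lo = ((lo + hi) / 2 - lo) + (hi - (lo + hi) / 2) := by omega
          rw [hs, List.take_add, hdd]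
        rw [hsplit, List.flatMap_append, pvM_append]
        simp
        omega

-- ===== VERDICT (by name: the statement is the Claim_ definition above) =====
theorem get_all_vocabulary_spec : Claim_equal_get_all_vocabulary := by
  intro data colunm_name _ hpre
  unfold Spec_get_all_vocabulary get_all_vocabulary get_all_vocabulary_alt
  cases h : pvLookup data colunm_name with
  | none => rfl
  | some col =>
    show (col.foldl
        (fun acc cut_query =>
          let m := if (cut_query.length : Int) > acc.2 then (cut_query.length : Int) else acc.2
          (acc.1 ++ cut_query, m))
        ([], 0)) = pvSolve col 0 col.length
    rw [pv_fused_loop col [] 0 le_rfl, pvSolve_eq col col.length 0 col.length rfl le_rfl]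
    simp
    have := pvM_shift col 0 le_rfl
    simp [pvM] at *
    omega
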